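-- pv_equiv track=rewrite | github.com/codingmonster07/rampage-python | append_zeros_to_last.py | remove_zeroes
-- ===== SOURCE A (Python) =====
-- def remove_zeroes(n):
--     new_string = str(n)
--     new_list = list(new_string)
--
--     for num in new_list:
--         if num =='0':
--             new_list.append('0')
--             new_list.remove('0')
--         else:
--             continue
--     return ''.join(new_list)
-- ===== SOURCE B (Python) =====
-- def remove_zeroes(n):
--     s = str(n)
--     return ''.join(c for c in s if c != '0') + '0' * s.count('0')
-- ===== Notes on version B (the rewrite author's own statement) =====
-- stated objective: simpler
-- what changed: Replaces the mutate-while-iterating append/remove loop with a single filter of the non-'0' characters plus '0' * count appended at the end.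
import Mathlib
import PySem

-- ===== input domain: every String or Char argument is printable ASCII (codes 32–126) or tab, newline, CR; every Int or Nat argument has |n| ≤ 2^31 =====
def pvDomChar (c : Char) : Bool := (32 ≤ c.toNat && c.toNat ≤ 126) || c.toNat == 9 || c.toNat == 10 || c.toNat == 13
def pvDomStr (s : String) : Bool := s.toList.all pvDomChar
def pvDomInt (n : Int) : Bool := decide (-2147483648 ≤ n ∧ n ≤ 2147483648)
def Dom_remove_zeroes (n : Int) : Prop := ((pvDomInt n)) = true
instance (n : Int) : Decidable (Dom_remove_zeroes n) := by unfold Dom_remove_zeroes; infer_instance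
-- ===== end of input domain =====

-- B replaces A's quirky mutate-while-iterating append/remove loop by one filter plus an
-- appended run of zeros (objective: simpler); return values proved equal for every Int.

-- ===== PORT A =====
-- Python's `for num in new_list` walks the list by an internal index while the body mutates
-- it; the '0' branch appends a '0' and removes the first '0', leaving the length unchanged,
-- so the loop performs exactly (original length) iterations with num = new_list[i].
def pvStepA (l : List Char) (i : Nat) : List Char :=
  if l.getD i ' ' = '0' then (PySem.List.remove? (l ++ ['0']) '0').getD (l ++ ['0'])
  else l

def remove_zeroes (n : Int) : String :=
  let new_list := (PySem.Int.toStr n).toList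
  String.ofList ((List.range new_list.length).foldl pvStepA new_list)

-- ===== PORT B =====
def remove_zeroes_alt (n : Int) : String :=
  let s := (PySem.Int.toStr n).toList
  String.ofList (s.filter (fun c => c != '0') ++ List.replicate (PySem.List.count s '0') '0')

-- ===== PRECONDITION & SPEC =====
def Spec_remove_zeroes (n : Int) (out : String) : Prop := out = remove_zeroes_alt n
instance (n : Int) (out : String) : Decidable (Spec_remove_zeroes n out) := by unfold Spec_remove_zeroes; infer_instance

-- ===== CLAIM (what is proved, stated in full; the proofs are below) =====
def Claim_equal_remove_zeroes : Prop := ∀ (n : Int), Dom_remove_zeroes n → Spec_remove_zeroes n (remove_zeroes n)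

-- ===== LEMMAS AND PROOFS =====

-- removing the first '0' of X ++ Y finds it in Y when X has none
lemma pvRemove_append_not_mem (X Y : List Char) (h : '0' ∉ X) :
    PySem.List.remove? (X ++ Y) '0' = (PySem.List.remove? Y '0').map (X ++ ·) := by
  induction X with
  | nil => simp
  | cons x xs ih =>
      have hx : x ≠ '0' := fun he => h (by simp [he])
      have hxs : '0' ∉ xs := fun hm => h (by simp [hm])
      rw [List.cons_append, PySem.List.remove?_cons_of_ne _ hx, ih hxs]
      cases PySem.List.remove? Y '0' <;> rfl

-- erasing one '0' does not change the non-'0' filter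
lemma pvFilter_erase (P : List Char) :
    (P.erase '0').filter (fun c => c != '0') = P.filter (fun c => c != '0') := by
  induction P with
  | nil => rfl
  | cons x xs ih =>
      by_cases hx : x = '0'
      · subst hx; simp [List.erase_cons_head]
      · rw [List.erase_cons_tail (by simp [hx])]
        simp [hx, ih]

-- tail phase: pointer is at/after the processed prefix P, only zeros remain to scan;
-- each step moves one '0' of P to the end until P is zero-free.
lemma pvTail : ∀ (k : Nat) (P : List Char) (q i : Nat),
    P.length + q = i + k → P.length ≤ i → P.count '0' ≤ k →
    (List.range' i k).foldl pvStepA (P ++ List.replicate q '0')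
      = P.filter (fun c => c != '0') ++ List.replicate (q + P.count '0') '0' := by
  intro k
  induction k with
  | zero =>
      intro P q i hlen _ hcnt
      have h0 : P.count '0' = 0 := Nat.le_zero.mp hcnt
      have hP : P.filter (fun c => c != '0') = P := by
        refine List.filter_eq_self.mpr ?_
        intro a ha
        have : a ≠ '0' := fun he => (List.count_eq_zero.mp h0) (he ▸ ha)
        simp [this]
      simp [hP, h0]
  | succ k ih =>
      intro P q i hlen hle hcnt
      have hq : 0 < q := by omega
      have hget : (P ++ List.replicate q '0').getD i ' ' = '0' := by
        rw [List.getD_append_right _ _ _ _ hle]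
        have hlt : i - P.length < q := by omega
        simp [List.getD, hlt]
      have hstep : pvStepA (P ++ List.replicate q '0') i
          = if '0' ∈ P then P.erase '0' ++ List.replicate (q + 1) '0'
            else P ++ List.replicate q '0' := by
        unfold pvStepA
        rw [if_pos hget]
        by_cases hm : '0' ∈ P
        · rw [if_pos hm]
          rw [PySem.List.remove?_eq_some_erase _ '0' (by simp [hm])]
          have h2 : (P ++ List.replicate q '0' ++ ['0']).erase '0'
              = P.erase '0' ++ (List.replicate q '0' ++ ['0']) := by
            rw [List.append_assoc, List.erase_append_left _ hm]
          rw [Option.getD_some, h2]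
          simp [List.replicate_succ']
        · rw [if_neg hm]
          have hrep : List.replicate q '0' ++ ['0'] = '0' :: List.replicate q '0' := by
            rw [← List.replicate_succ']
            rfl
          rw [List.append_assoc, pvRemove_append_not_mem _ _ hm, hrep,
            PySem.List.remove?_cons_self]
          rfl
      rw [List.range'_succ, List.foldl_cons, hstep]
      by_cases hm : '0' ∈ P
      · rw [if_pos hm]
        have h1 : (P.erase '0').length + (q + 1) = (i + 1) + k := by
          rw [List.length_erase_of_mem hm]
          have : 1 ≤ P.length := List.length_pos_of_mem hm
          omega
        have h2 : (P.erase '0').length ≤ i + 1 := by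
          rw [List.length_erase_of_mem hm]; omega
        have hc : 0 < P.count '0' := List.count_pos_iff.mpr hm
        have h3 : (P.erase '0').count '0' ≤ k := by
          rw [List.count_erase_self]; omega
        rw [ih _ _ _ h1 h2 h3, pvFilter_erase, List.count_erase_self]
        congr 2
        omega
      · rw [if_neg hm]
        have h0 : P.count '0' = 0 := List.count_eq_zero.mpr hm
        exact ih P q (i + 1) (by omega) (by omega) (by omega)

-- main phase: P is the processed prefix (pointer = |P|), drop t s is still unscanned,
-- q zeros have already been moved to the end.
lemma pvMain : ∀ (k : Nat) (s P : List Char) (t q : Nat),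
    t ≤ s.length →
    P.filter (fun c => c != '0') = (s.take t).filter (fun c => c != '0') →
    P.count '0' + q = (s.take t).count '0' →
    P.count '0' ≤ q →
    (s.length - t) + q = k →
    (List.range' P.length k).foldl pvStepA (P ++ s.drop t ++ List.replicate q '0')
      = s.filter (fun c => c != '0') ++ List.replicate (s.count '0') '0' := by
  intro k
  induction k with
  | zero =>
      intro s P t q ht hfil hcnt hle hk
      have hq : q = 0 := by omega
      have ht' : t = s.length := by omega
      subst hq; subst ht'
      have htake : s.take s.length = s := List.take_length
      rw [htake] at hfil hcnt
      have h0 : P.count '0' = 0 := by omega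
      have hs0 : s.count '0' = 0 := by omega
      have hP : P.filter (fun c => c != '0') = P := by
        refine List.filter_eq_self.mpr ?_
        intro a ha
        have : a ≠ '0' := fun he => (List.count_eq_zero.mp h0) (he ▸ ha)
        simp [this]
      simp [hs0, ← hfil, hP]
  | succ k ih =>
      intro s P t q ht hfil hcnt hle hk
      by_cases htop : t = s.length
      · -- hand off to the tail phase
        subst htop
        rw [List.take_length] at hfil hcnt
        simp only [List.drop_length, List.append_nil]
        rw [pvTail (k + 1) P q P.length (by omega) le_rfl (by omega), hfil]
        congr 2
        omega
      · have htlt : t < s.length := lt_of_le_of_ne ht htop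
        have hdrop : s.drop t = s[t] :: s.drop (t + 1) := List.drop_eq_getElem_cons htlt
        have htake1 : s.take (t + 1) = s.take t ++ [s[t]] := by
          rw [List.take_add_one]
          simp [List.getElem?_eq_getElem htlt]
        have hget : (P ++ s.drop t ++ List.replicate q '0').getD P.length ' ' = s[t] := by
          rw [List.append_assoc, List.getD_append_right _ _ _ _ le_rfl, Nat.sub_self, hdrop]
          rfl
        rw [List.range'_succ, List.foldl_cons]
        by_cases hc : s[t] = '0'
        · -- current char is '0': append then remove the first '0'
          have hstep : pvStepA (P ++ s.drop t ++ List.replicate q '0') P.length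
              = if '0' ∈ P
                then P.erase '0' ++ s.drop t ++ List.replicate (q + 1) '0'
                else P ++ s.drop (t + 1) ++ List.replicate (q + 1) '0' := by
            unfold pvStepA
            rw [if_pos (by rw [hget]; exact hc)]
            have hsplit : P ++ s.drop t ++ List.replicate q '0' ++ ['0']
                = P ++ (s.drop t ++ List.replicate (q + 1) '0') := by
              rw [List.replicate_succ', ← List.append_assoc]
              simp [List.append_assoc]
            by_cases hm : '0' ∈ P
            · rw [if_pos hm, hsplit, PySem.List.remove?_eq_some_erase _ '0' (by simp [hm]),
                List.erase_append_left _ hm]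
              simp [List.append_assoc]
            · rw [if_neg hm, hsplit, pvRemove_append_not_mem _ _ hm]
              have : s.drop t ++ List.replicate (q + 1) '0'
                  = '0' :: (s.drop (t + 1) ++ List.replicate (q + 1) '0') := by
                rw [hdrop, hc]; rfl
              rw [this, PySem.List.remove?_cons_self]
              simp [List.append_assoc]
          rw [hstep]
          by_cases hm : '0' ∈ P
          · rw [if_pos hm]
            -- the loop pointer has skipped over s[t] (which is '0'): fold it into the prefix
            by_cases ht1 : t + 1 = s.length
            · -- only that '0' remained unscanned: tail phase with prefix P.erase '0' ++ ['0']
              have hdrop1 : s.drop t = ['0'] := by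
                rw [hdrop, hc, ht1, List.drop_length]
              have hstate : P.erase '0' ++ s.drop t ++ List.replicate (q + 1) '0'
                  = (P.erase '0' ++ ['0']) ++ List.replicate (q + 1) '0' := by
                rw [hdrop1]
              have hcp : 0 < P.count '0' := List.count_pos_iff.mpr hm
              have hlp : 1 ≤ P.length := List.length_pos_of_mem hm
              have hlene : (P.erase '0').length = P.length - 1 := List.length_erase_of_mem hm
              have hcnte : (P.erase '0').count '0' = P.count '0' - 1 := List.count_erase_self
              have hk' : k = q := by
                have : s.length - t = 1 := by omega
                omega
              rw [hstate, pvTail k (P.erase '0' ++ ['0']) (q + 1) (P.length + 1)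
                (by simp only [List.length_append, List.length_cons, List.length_nil, hlene]; omega)
                (by simp only [List.length_append, List.length_cons, List.length_nil, hlene]; omega)
                (by simp only [List.count_append, hcnte, List.count_cons, List.count_nil,
                      beq_self_eq_true, if_true]; omega)]
              have hsfil : s.filter (fun c => c != '0') = (s.take t).filter (fun c => c != '0') := by
                conv_lhs => rw [← List.take_append_drop t s]
                rw [List.filter_append, hdrop1]
                simp
              have hscnt : s.count '0' = (s.take t).count '0' + 1 := by
                conv_lhs => rw [← List.take_append_drop t s]
                rw [List.count_append, hdrop1]
                simp
              have e1 : (P.erase '0' ++ ['0']).filter (fun c => c != '0')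
                  = P.filter (fun c => c != '0') := by
                rw [List.filter_append, pvFilter_erase]; simp
              have e2 : (P.erase '0' ++ ['0']).count '0' = P.count '0' := by
                rw [List.count_append, hcnte]; simp; omega
              rw [e1, e2, hsfil, ← hfil, hscnt]
              congr 2
              omega
            · -- fold the skipped '0' and the next char s[t+1] into the prefix
              have ht2 : t + 2 ≤ s.length := by omega
              have htlt1 : t + 1 < s.length := by omega
              have hdrop2 : s.drop (t + 1) = s[t + 1] :: s.drop (t + 2) :=
                List.drop_eq_getElem_cons htlt1
              have htake2 : s.take (t + 2) = s.take t ++ ['0', s[t + 1]] := by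
                have : t + 2 = (t + 1) + 1 := by omega
                rw [this, List.take_add_one, htake1, hc]
                simp [List.getElem?_eq_getElem htlt1]
              have hstate : P.erase '0' ++ s.drop t ++ List.replicate (q + 1) '0'
                  = (P.erase '0' ++ ['0', s[t + 1]]) ++ s.drop (t + 2)
                      ++ List.replicate (q + 1) '0' := by
                rw [hdrop, hc, hdrop2]
                simp [List.append_assoc]
              have hcp : 0 < P.count '0' := List.count_pos_iff.mpr hm
              have hlp : 1 ≤ P.length := List.length_pos_of_mem hm
              have hlene : (P.erase '0').length = P.length - 1 := List.length_erase_of_mem hm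
              have hcnte : (P.erase '0').count '0' = P.count '0' - 1 := List.count_erase_self
              have hres := ih s (P.erase '0' ++ ['0', s[t + 1]]) (t + 2) (q + 1) ht2
                (by rw [List.filter_append, pvFilter_erase, htake2, List.filter_append,
                      hfil])
                (by rw [List.count_append, hcnte, htake2, List.count_append]
                    by_cases h01 : s[t + 1] = '0' <;> simp [h01] <;> omega)
                (by rw [List.count_append, hcnte]
                    simp only [List.count_cons, List.count_nil]
                    by_cases h01 : s[t + 1] = '0' <;> simp [h01] <;> omega)
                (by omega)
              rw [hstate]
              have hlen2 : (P.erase '0' ++ ['0', s[t + 1]]).length = P.length + 1 := by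
                simp [hlene]; omega
              rw [← hlen2, hres]
          · -- no '0' in P: the removed '0' is s[t] itself; s[t+1] gets skipped (if any)
            rw [if_neg hm]
            have h0 : P.count '0' = 0 := List.count_eq_zero.mpr hm
            by_cases ht1 : t + 1 = s.length
            · -- nothing left to scan but appended zeros: tail phase
              have hdropnil : s.drop (t + 1) = by exact ([] : List Char) := by
                rw [ht1, List.drop_length]
              have hk' : k = q := by
                have : s.length - t = 1 := by omega
                omega
              rw [hdropnil, List.append_nil]
              rw [pvTail k P (q + 1) (P.length + 1) (by omega) (by omega) (by omega)]
              have hdrop1 : s.drop t = ['0'] := by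
                rw [hdrop, hc, ht1, List.drop_length]
              have hsfil : s.filter (fun c => c != '0') = (s.take t).filter (fun c => c != '0') := by
                conv_lhs => rw [← List.take_append_drop t s]
                rw [List.filter_append, hdrop1]
                simp
              have hscnt : s.count '0' = (s.take t).count '0' + 1 := by
                conv_lhs => rw [← List.take_append_drop t s]
                rw [List.count_append, hdrop1]
                simp
              rw [hsfil, ← hfil, hscnt, ← hcnt]
              congr 2
              omega
            · have ht2 : t + 2 ≤ s.length := by omega
              have htlt1 : t + 1 < s.length := by omega
              have hdrop2 : s.drop (t + 1) = s[t + 1] :: s.drop (t + 2) :=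
                List.drop_eq_getElem_cons htlt1
              have htake2 : s.take (t + 2) = s.take t ++ ['0', s[t + 1]] := by
                have : t + 2 = (t + 1) + 1 := by omega
                rw [this, List.take_add_one, htake1, hc]
                simp [List.getElem?_eq_getElem htlt1]
              have hstate : P ++ s.drop (t + 1) ++ List.replicate (q + 1) '0'
                  = (P ++ [s[t + 1]]) ++ s.drop (t + 2) ++ List.replicate (q + 1) '0' := by
                rw [hdrop2]
                simp [List.append_assoc]
              have hres := ih s (P ++ [s[t + 1]]) (t + 2) (q + 1) ht2
                (by rw [List.filter_append, htake2, List.filter_append, hfil]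
                    simp only [List.filter_cons, List.filter_nil]
                    simp)
                (by rw [List.count_append, htake2, List.count_append]
                    by_cases h01 : s[t + 1] = '0' <;> simp [h01] <;> omega)
                (by rw [List.count_append]
                    simp only [List.count_cons, List.count_nil]
                    by_cases h01 : s[t + 1] = '0' <;> simp [h01] <;> omega)
                (by omega)
              rw [hstate]
              have hlen2 : (P ++ [s[t + 1]]).length = P.length + 1 := by simp
              rw [← hlen2, hres]
        · -- current char is not '0': nothing changes, fold it into the prefix
          have hstep : pvStepA (P ++ s.drop t ++ List.replicate q '0') P.length
              = P ++ s.drop t ++ List.replicate q '0' := by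
            unfold pvStepA
            rw [if_neg (by rw [hget]; exact hc)]
          rw [hstep]
          have hstate : P ++ s.drop t ++ List.replicate q '0'
              = (P ++ [s[t]]) ++ s.drop (t + 1) ++ List.replicate q '0' := by
            rw [hdrop]
            simp [List.append_assoc]
          have hres := ih s (P ++ [s[t]]) (t + 1) q (by omega)
            (by rw [List.filter_append, htake1, List.filter_append, hfil])
            (by rw [List.count_append, htake1, List.count_append]
                simp only [List.count_cons, List.count_nil]
                omega)
            (by rw [List.count_append]
                simp [hc]
                omega)
            (by omega)
          rw [hstate]
          have hlen2 : (P ++ [s[t]]).length = P.length + 1 := by simp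
          rw [← hlen2, hres]

-- the whole loop: from the initial state ([] processed, everything unscanned)
lemma pvLoop (s : List Char) :
    (List.range s.length).foldl pvStepA s
      = s.filter (fun c => c != '0') ++ List.replicate (s.count '0') '0' := by
  have h := pvMain s.length s [] 0 0 (by omega) (by simp) (by simp) (by simp) (by omega)
  simpa [List.range_eq_range'] using h

-- ===== VERDICT (by name: the statement is the Claim_ definition above) =====
theorem remove_zeroes_spec : Claim_equal_remove_zeroes := by
  intro n _
  show remove_zeroes n = remove_zeroes_alt n
  simp only [remove_zeroes, remove_zeroes_alt, pvLoop, PySem.List.count_eq]
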